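-- pv_equiv track=rewrite | github.com/coding19-imdea/coding19-imdea.github.io | submissions/problem3/Matteo Campanelli.py | solve
-- ===== SOURCE A (Python) =====
-- def apply_transform(transf, state):
--     if len(state) < 2:
--         return (state, False)
--
--     last_pair = (state[-2], state[-1])
--     if last_pair in transf: # transformation!
--         new_last = transf[last_pair]
--         return (state[:-2] + [new_last], True)
--
--     return (state, False)
--
-- def solve(transf, antipairs, outbreaks):
--     state = []
--     for virus in outbreaks:
--         state.append(virus)
--         state, did_transform = apply_transform(transf, state)
--         if did_transform:
--             continue
--
--         # Check antipairs
--         all_els = set(state)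
--         for p in antipairs:
--             if p[0] in all_els and p[1] in all_els:
--                 # annihilation!
--                 state = []
--
--     return state
-- ===== SOURCE B (Python) =====
-- def solve(transf, antipairs, outbreaks):
--     # Antipair partners indexed by element once up front; a 'dirty' set of elements
--     # added since the last completed check replaces A's full scan of all antipairs
--     # (any newly satisfied antipair must touch a dirty element), and the membership
--     # set rebuild is replaced by an incrementally maintained multiplicity counter.
--     partners = {}
--     for x, y in antipairs:
--         partners.setdefault(x, []).append(y)
--         partners.setdefault(y, []).append(x)
--     state = []
--     count = {}      # multiplicity of each element of state, updated on push/pop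
--     dirty = set()   # elements pushed since the last completed annihilation check
--     for virus in outbreaks:
--         state.append(virus)
--         count[virus] = count.get(virus, 0) + 1
--         dirty.add(virus)
--         new = transf.get((state[-2], state[-1])) if len(state) >= 2 else None
--         if new is not None:
--             for gone in (state.pop(), state.pop()):
--                 count[gone] = count.get(gone, 0) - 1
--             state.append(new)
--             count[new] = count.get(new, 0) + 1
--             dirty.add(new)
--         else:
--             if any(count.get(d, 0) > 0 and count.get(p, 0) > 0
--                    for d in dirty for p in partners.get(d, ())):
--                 state = []
--                 count = {}
--             dirty = set()
--     return state
-- ===== Notes on version B (the rewrite author's own statement) =====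
-- stated objective: faster
-- what changed: B builds a partner index of the antipairs once and tracks a 'dirty' set of elements added since the last annihilation check, so each check consults only antipairs touching dirty elements (via the index) against an incrementally maintained multiplicity counter, instead of A's per-step rebuild of set(state) and full scan of all antipairs; the O(n) slice is replaced by two pops.
import Mathlib
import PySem

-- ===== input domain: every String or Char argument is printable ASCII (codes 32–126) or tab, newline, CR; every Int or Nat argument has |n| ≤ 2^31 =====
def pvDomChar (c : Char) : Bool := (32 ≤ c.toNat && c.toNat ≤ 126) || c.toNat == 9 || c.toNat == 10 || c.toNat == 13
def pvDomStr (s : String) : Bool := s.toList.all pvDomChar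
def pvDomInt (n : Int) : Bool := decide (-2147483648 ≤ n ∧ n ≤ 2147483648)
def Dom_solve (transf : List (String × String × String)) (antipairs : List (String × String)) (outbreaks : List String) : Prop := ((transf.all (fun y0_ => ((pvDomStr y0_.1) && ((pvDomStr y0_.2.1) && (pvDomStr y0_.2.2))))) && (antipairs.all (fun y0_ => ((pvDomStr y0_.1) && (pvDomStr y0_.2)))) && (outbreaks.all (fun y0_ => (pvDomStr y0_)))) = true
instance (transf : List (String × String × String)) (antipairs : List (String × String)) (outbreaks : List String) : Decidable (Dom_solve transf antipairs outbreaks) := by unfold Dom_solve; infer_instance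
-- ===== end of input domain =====

-- B indexes antipair partners by element once up front and, after each non-merge push, checks only
-- elements added since the last check (a 'dirty' set) against that index, with an incrementally
-- maintained multiplicity counter — instead of A's rebuild of set(state) and full antipair scan each step.


-- ===== PORT A =====
-- dict[(s1,s2)] lookup on the association list (first match); shared dict primitive of both ports
-- (A's 'last_pair in transf' + 'transf[last_pair]', B's 'transf.get(last_pair)')
def transfGet? (transf : List (String × String × String)) (a b : String) : Option String :=
  match transf with
  | [] => none
  | (x, y, v) :: rest => if x = a ∧ y = b then some v else transfGet? rest a b

def applyTransform (transf : List (String × String × String)) (state : List String) :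
    List String × Bool :=
  if state.length < 2 then (state, false)
  else
    match transfGet? transf (PySem.List.pyGetD state (-2) "") (PySem.List.pyGetD state (-1) "") with
    | some newLast => (PySem.List.slice state none (some (-2)) ++ [newLast], true)
    | none => (state, false)

-- body of A's 'for virus in outbreaks' loop
def solveStep (transf : List (String × String × String)) (antipairs : List (String × String))
    (state : List String) (virus : String) : List String :=
  let st := state ++ [virus]
  let r := applyTransform transf st
  if r.2 then r.1
  else
    let allEls := PySem.Set.ofList r.1
    antipairs.foldl (fun st2 p =>
      if allEls.contains p.1 && allEls.contains p.2 then [] else st2) r.1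

def solve (transf : List (String × String × String)) (antipairs : List (String × String)) (outbreaks : List String) : List String :=
  outbreaks.foldl (solveStep transf antipairs) []

-- ===== PORT B =====
-- partners.setdefault(x, []).append(y); partners.setdefault(y, []).append(x)
def partnerStep (d : PySem.Dict String (List String)) (p : String × String) :
    PySem.Dict String (List String) :=
  (d.modify p.1 [] (· ++ [p.2])).modify p.2 [] (· ++ [p.1])

def buildPartners (antipairs : List (String × String)) : PySem.Dict String (List String) :=
  antipairs.foldl partnerStep PySem.Dict.empty

-- body of B's loop: (state, multiplicity counter, dirty set of elements added since last check)
def altStep (transf : List (String × String × String)) (partners : PySem.Dict String (List String))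
    (acc : List String × PySem.Dict String Int × PySem.Set String) (virus : String) :
    List String × PySem.Dict String Int × PySem.Set String :=
  let state := acc.1 ++ [virus]
  let count := acc.2.1.insert virus (acc.2.1.getD virus 0 + 1)
  let dirty := PySem.Set.add acc.2.2 virus
  -- 'transf.get((state[-2], state[-1])) if len(state) >= 2 else None'
  let new? : Option String :=
    if 2 ≤ state.length then
      transfGet? transf (PySem.List.pyGetD state (-2) "") (PySem.List.pyGetD state (-1) "")
    else none
  match new? with
  | some nw =>
    let g1 := PySem.List.pyGetD state (-1) ""   -- state.pop()
    let s1 := state.dropLast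
    let c1 := count.insert g1 (count.getD g1 0 - 1)
    let g2 := PySem.List.pyGetD s1 (-1) ""      -- state.pop()
    let s2 := s1.dropLast
    let c2 := c1.insert g2 (c1.getD g2 0 - 1)
    (s2 ++ [nw], c2.insert nw (c2.getD nw 0 + 1), PySem.Set.add dirty nw)
  | none =>
    -- only antipairs touching a dirty element are consulted (any(), so set order is immaterial)
    if dirty.any (fun d => (partners.getD d []).any
        (fun p => decide (0 < count.getD d 0) && decide (0 < count.getD p 0)))
    then ([], PySem.Dict.empty, PySem.Set.empty)
    else (state, count, PySem.Set.empty)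

def solve_alt (transf : List (String × String × String)) (antipairs : List (String × String)) (outbreaks : List String) : List String :=
  let partners := buildPartners antipairs
  (outbreaks.foldl (altStep transf partners) ([], PySem.Dict.empty, PySem.Set.empty)).1

-- ===== PRECONDITION & SPEC =====
def Spec_solve (transf : List (String × String × String)) (antipairs : List (String × String)) (outbreaks : List String) (out : List String) : Prop := out = solve_alt transf antipairs outbreaks
instance (transf : List (String × String × String)) (antipairs : List (String × String)) (outbreaks : List String) (out : List String) : Decidable (Spec_solve transf antipairs outbreaks out) := by unfold Spec_solve; infer_instance

-- ===== CLAIM (what is proved, stated in full; the proofs are below) =====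
def Claim_equal_solve : Prop := ∀ (transf : List (String × String × String)) (antipairs : List (String × String)) (outbreaks : List String), Dom_solve transf antipairs outbreaks → Spec_solve transf antipairs outbreaks (solve transf antipairs outbreaks)

-- ===== LEMMAS AND PROOFS =====

-- the counter holds exactly the multiplicities of the state list
def RelSC (s : List String) (c : PySem.Dict String Int) : Prop :=
  ∀ e : String, c.getD e 0 = (s.count e : Int)

-- dirty-set invariant: every fully-present antipair touches a dirty element
def InvD (antipairs : List (String × String)) (s : List String) (D : PySem.Set String) : Prop :=
  ∀ p ∈ antipairs, p.1 ∈ s → p.2 ∈ s → p.1 ∈ D ∨ p.2 ∈ D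

theorem rel_empty : RelSC [] PySem.Dict.empty := by
  intro e; simp [PySem.Dict.getD_empty]

theorem rel_push {s : List String} {c : PySem.Dict String Int} (h : RelSC s c) (x : String) :
    RelSC (s ++ [x]) (c.insert x (c.getD x 0 + 1)) := by
  intro e
  rw [PySem.Dict.getD_insert]
  simp only [List.count_append, List.count_cons, List.count_nil]
  rcases eq_or_ne e x with rfl | hne
  · simp [h e]
  · simp [hne, Ne.symm hne, h e]

theorem rel_pop {t : List String} {d : PySem.Dict String Int} {x : String}
    (h : RelSC (t ++ [x]) d) : RelSC t (d.insert x (d.getD x 0 - 1)) := by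
  intro e
  rw [PySem.Dict.getD_insert]
  have he := h e
  have hx := h x
  simp only [List.count_append, List.count_cons, List.count_nil] at he hx
  rcases eq_or_ne e x with rfl | hne
  · simp only [BEq.rfl, if_true] at hx ⊢
    simp at hx
    omega
  · simp [hne, Ne.symm hne] at he ⊢
    omega

theorem rel_pos_iff_mem {s : List String} {c : PySem.Dict String Int} (h : RelSC s c)
    (x : String) : (0 < c.getD x 0) ↔ x ∈ s := by
  rw [h x]
  exact_mod_cast List.count_pos_iff

theorem contains_ofList_eq (l : List String) (x : String) :
    (PySem.Set.ofList l).contains x = decide (x ∈ l) := by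
  simp [PySem.Set.contains, PySem.Set.mem_ofList]

theorem foldl_annihilate (l : List (String × String)) (f : String × String → Bool)
    (s : List String) :
    l.foldl (fun st2 p => if f p then [] else st2) s = if l.any f then [] else s := by
  induction l generalizing s with
  | nil => simp
  | cons p ps ih =>
    rw [List.foldl_cons, ih]
    by_cases hp : f p = true <;> by_cases hq : ps.any f = true <;> simp [hp, hq]

-- membership in the partner index: exactly the antipair partners (either orientation)
theorem mem_partners_fold (l : List (String × String)) (d : PySem.Dict String (List String))
    (x y : String) :
    y ∈ (l.foldl partnerStep d).getD x [] ↔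
      y ∈ d.getD x [] ∨ (x, y) ∈ l ∨ (y, x) ∈ l := by
  induction l generalizing d with
  | nil => simp
  | cons p ps ih =>
    rw [List.foldl_cons, ih]
    have hmod : (partnerStep d p).getD x [] =
        (if x = p.2 then
          ((if p.2 = p.1 then d.getD p.1 [] ++ [p.2] else d.getD p.2 []) ++ [p.1])
        else if x = p.1 then d.getD p.1 [] ++ [p.2] else d.getD x []) := by
      simp only [partnerStep, PySem.Dict.getD_modify]
    rw [hmod]
    by_cases h2 : x = p.2 <;> by_cases h1 : x = p.1 <;>
      by_cases h21 : p.2 = p.1 <;>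
      simp_all [List.mem_append, List.mem_cons, Prod.ext_iff] <;> tauto

theorem mem_partners (antipairs : List (String × String)) (x y : String) :
    y ∈ (buildPartners antipairs).getD x [] ↔ (x, y) ∈ antipairs ∨ (y, x) ∈ antipairs := by
  unfold buildPartners
  rw [mem_partners_fold]
  simp [PySem.Dict.getD_empty]

-- the dirty-indexed check computes exactly A's full antipair scan
theorem check_eq (antipairs : List (String × String)) (s : List String)
    (c : PySem.Dict String Int) (D : PySem.Set String) (hc : RelSC s c)
    (hD : InvD antipairs s D) :
    (D.any fun d => ((buildPartners antipairs).getD d []).any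
        fun p => decide (0 < c.getD d 0) && decide (0 < c.getD p 0)) =
    (antipairs.any fun p => decide (p.1 ∈ s) && decide (p.2 ∈ s)) := by
  rw [Bool.eq_iff_iff]
  simp only [List.any_eq_true, Bool.and_eq_true, decide_eq_true_eq]
  constructor
  · rintro ⟨d, hdD, p, hp, h1, h2⟩
    have hd : d ∈ s := (rel_pos_iff_mem hc d).mp h1
    have hpm : p ∈ s := (rel_pos_iff_mem hc p).mp h2
    rcases (mem_partners antipairs d p).mp hp with h | h
    · exact ⟨(d, p), h, hd, hpm⟩
    · exact ⟨(p, d), h, hpm, hd⟩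
  · rintro ⟨q, hq, h1, h2⟩
    rcases hD q hq h1 h2 with h | h
    · exact ⟨q.1, h, q.2, (mem_partners antipairs q.1 q.2).mpr (Or.inl hq),
        (rel_pos_iff_mem hc q.1).mpr h1, (rel_pos_iff_mem hc q.2).mpr h2⟩
    · exact ⟨q.2, h, q.1, (mem_partners antipairs q.2 q.1).mpr (Or.inr hq),
        (rel_pos_iff_mem hc q.2).mpr h2, (rel_pos_iff_mem hc q.1).mpr h1⟩

-- shared conclusion for the no-transformation case (annihilation check on both sides)
theorem step_none_aux (transf : List (String × String × String))
    (antipairs : List (String × String)) (s : List String) (c : PySem.Dict String Int)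
    (D : PySem.Set String) (v : String) (hc : RelSC s c) (hD : InvD antipairs s D)
    (hAT : applyTransform transf (s ++ [v]) = (s ++ [v], false))
    (hT : (if 2 ≤ (s ++ [v]).length then
        transfGet? transf (PySem.List.pyGetD (s ++ [v]) (-2) "")
          (PySem.List.pyGetD (s ++ [v]) (-1) "")
      else none) = (none : Option String)) :
    (altStep transf (buildPartners antipairs) (s, c, D) v).1 = solveStep transf antipairs s v ∧
    RelSC (altStep transf (buildPartners antipairs) (s, c, D) v).1
      (altStep transf (buildPartners antipairs) (s, c, D) v).2.1 ∧
    InvD antipairs (altStep transf (buildPartners antipairs) (s, c, D) v).1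
      (altStep transf (buildPartners antipairs) (s, c, D) v).2.2 := by
  have hpush := rel_push hc v
  have hDpush : InvD antipairs (s ++ [v]) (PySem.Set.add D v) := by
    intro p hp h1 h2
    rcases List.mem_append.mp h1 with h1s | h1v
    · rcases List.mem_append.mp h2 with h2s | h2v
      · rcases hD p hp h1s h2s with h | h
        · exact Or.inl ((PySem.Set.mem_add _ _ _).mpr (Or.inl h))
        · exact Or.inr ((PySem.Set.mem_add _ _ _).mpr (Or.inl h))
      · exact Or.inr ((PySem.Set.mem_add _ _ _).mpr (Or.inr (by simpa using h2v)))
    · exact Or.inl ((PySem.Set.mem_add _ _ _).mpr (Or.inr (by simpa using h1v)))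
  have hB : altStep transf (buildPartners antipairs) (s, c, D) v =
      if (PySem.Set.add D v).any (fun d => ((buildPartners antipairs).getD d []).any
          (fun p => decide (0 < (c.insert v (c.getD v 0 + 1)).getD d 0) &&
            decide (0 < (c.insert v (c.getD v 0 + 1)).getD p 0)))
      then ([], PySem.Dict.empty, PySem.Set.empty)
      else (s ++ [v], c.insert v (c.getD v 0 + 1), PySem.Set.empty) := by
    simp only [altStep]
    rw [hT]
  have hA : solveStep transf antipairs s v =
      if antipairs.any (fun p => decide (p.1 ∈ s ++ [v]) && decide (p.2 ∈ s ++ [v]))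
      then [] else s ++ [v] := by
    simp only [solveStep]
    rw [hAT]
    simp only [Bool.false_eq_true, if_false]
    rw [foldl_annihilate antipairs
      (fun p => (PySem.Set.ofList (s ++ [v])).contains p.1 &&
                (PySem.Set.ofList (s ++ [v])).contains p.2) (s ++ [v])]
    simp only [contains_ofList_eq]
  rw [hB, hA, check_eq antipairs (s ++ [v]) _ _ hpush hDpush]
  by_cases hany :
      (antipairs.any fun p => decide (p.1 ∈ s ++ [v]) && decide (p.2 ∈ s ++ [v])) = true
  · simp only [hany, if_true]
    exact ⟨by simp, rel_empty, by intro p _ h _; simp at h⟩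
  · simp only [Bool.not_eq_true] at hany
    simp only [hany, Bool.false_eq_true, if_false]
    refine ⟨by simp, hpush, ?_⟩
    intro p hp h1 h2
    exfalso
    have : (antipairs.any fun p => decide (p.1 ∈ s ++ [v]) && decide (p.2 ∈ s ++ [v])) = true := by
      simp only [List.any_eq_true, Bool.and_eq_true, decide_eq_true_eq]
      exact ⟨p, hp, h1, h2⟩
    rw [hany] at this
    exact absurd this (by simp)

theorem step_eq (transf : List (String × String × String))
    (antipairs : List (String × String)) (s : List String) (c : PySem.Dict String Int)
    (D : PySem.Set String) (v : String) (hc : RelSC s c) (hD : InvD antipairs s D) :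
    (altStep transf (buildPartners antipairs) (s, c, D) v).1 = solveStep transf antipairs s v ∧
    RelSC (altStep transf (buildPartners antipairs) (s, c, D) v).1
      (altStep transf (buildPartners antipairs) (s, c, D) v).2.1 ∧
    InvD antipairs (altStep transf (buildPartners antipairs) (s, c, D) v).1
      (altStep transf (buildPartners antipairs) (s, c, D) v).2.2 := by
  by_cases hlen : 2 ≤ (s ++ [v]).length
  · obtain ⟨u, a, rfl⟩ : ∃ u a, s = u ++ [a] := by
      rcases List.eq_nil_or_concat s with rfl | ⟨u, a, hs⟩
      · simp at hlen
      · exact ⟨u, a, by simpa using hs⟩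
    have hlen' : ((u ++ [a]) ++ [v]).length = u.length + 2 := by simp
    have hpush := rel_push hc v
    have hg1 : PySem.List.pyGetD ((u ++ [a]) ++ [v]) (-1) "" = v :=
      PySem.List.pyGetD_neg_one_append_singleton (u ++ [a]) v ""
    have hg2 : PySem.List.pyGetD (u ++ [a]) (-1) "" = a :=
      PySem.List.pyGetD_neg_one_append_singleton u a ""
    have hg2' : PySem.List.pyGetD ((u ++ [a]) ++ [v]) (-2) "" = a := by
      rw [PySem.List.pyGetD_neg_ofNat ((u ++ [a]) ++ [v]) 2 "" (by omega) (by omega)]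
      simp
    cases htr : transfGet? transf a v with
    | none =>
      have hT : (if 2 ≤ ((u ++ [a]) ++ [v]).length then
          transfGet? transf (PySem.List.pyGetD ((u ++ [a]) ++ [v]) (-2) "")
            (PySem.List.pyGetD ((u ++ [a]) ++ [v]) (-1) "")
        else none) = (none : Option String) := by
        rw [if_pos hlen, hg2', hg1, htr]
      have hAT : applyTransform transf ((u ++ [a]) ++ [v]) = ((u ++ [a]) ++ [v], false) := by
        unfold applyTransform
        rw [hg2', hg1, htr, if_neg (by omega)]
      exact step_none_aux transf antipairs (u ++ [a]) c D v hc hD hAT hT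
    | some nw =>
      have hslice : PySem.List.slice ((u ++ [a]) ++ [v]) none (some (-2)) = u := by
        rw [PySem.List.slice_to_neg_ofNat ((u ++ [a]) ++ [v]) 2 (by omega), hlen']
        rw [List.append_assoc]
        simp
      have hATs : applyTransform transf ((u ++ [a]) ++ [v]) = (u ++ [nw], true) := by
        unfold applyTransform
        rw [hg2', hg1, htr, if_neg (by omega), hslice]
      have hS : solveStep transf antipairs (u ++ [a]) v = u ++ [nw] := by
        simp only [solveStep]
        rw [hATs]
        simp
      have hDnew : InvD antipairs (u ++ [nw])
          (PySem.Set.add (PySem.Set.add D v) nw) := by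
        intro p hp h1 h2
        rcases List.mem_append.mp h1 with h1u | h1n
        · rcases List.mem_append.mp h2 with h2u | h2n
          · have h1s : p.1 ∈ (u ++ [a]) := List.mem_append.mpr (Or.inl h1u)
            have h2s : p.2 ∈ (u ++ [a]) := List.mem_append.mpr (Or.inl h2u)
            rcases hD p hp h1s h2s with h | h
            · exact Or.inl ((PySem.Set.mem_add _ _ _).mpr (Or.inl ((PySem.Set.mem_add _ _ _).mpr (Or.inl h))))
            · exact Or.inr ((PySem.Set.mem_add _ _ _).mpr (Or.inl ((PySem.Set.mem_add _ _ _).mpr (Or.inl h))))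
          · exact Or.inr ((PySem.Set.mem_add _ _ _).mpr (Or.inr (by simpa using h2n)))
        · exact Or.inl ((PySem.Set.mem_add _ _ _).mpr (Or.inr (by simpa using h1n)))
      simp only [altStep]
      rw [if_pos hlen, hg2', hg1, htr, List.dropLast_concat, hg2, List.dropLast_concat, hS]
      exact ⟨rfl, rel_push (rel_pop (rel_pop hpush)) nw, hDnew⟩
  · have hs : s = [] := by
      cases s with
      | nil => rfl
      | cons x xs => exact absurd (by simp) hlen
    subst hs
    have hT : (if 2 ≤ (([] : List String) ++ [v]).length then
        transfGet? transf (PySem.List.pyGetD (([] : List String) ++ [v]) (-2) "")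
          (PySem.List.pyGetD (([] : List String) ++ [v]) (-1) "")
      else none) = (none : Option String) := by
      rw [if_neg (by simp)]
    have hAT : applyTransform transf (([] : List String) ++ [v]) =
        ((([] : List String) ++ [v]), false) := by
      unfold applyTransform
      rw [if_pos (by simp)]
    exact step_none_aux transf antipairs [] c D v hc hD hAT hT

theorem fold_eq (transf : List (String × String × String)) (antipairs : List (String × String))
    (l : List String) (s : List String) (c : PySem.Dict String Int) (D : PySem.Set String)
    (hc : RelSC s c) (hD : InvD antipairs s D) :
    (l.foldl (altStep transf (buildPartners antipairs)) (s, c, D)).1 =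
      l.foldl (solveStep transf antipairs) s := by
  induction l generalizing s c D with
  | nil => rfl
  | cons v vs ih =>
    obtain ⟨h1, h2, h3⟩ := step_eq transf antipairs s c D v hc hD
    simp only [List.foldl_cons]
    have hsplit : altStep transf (buildPartners antipairs) (s, c, D) v =
        ((altStep transf (buildPartners antipairs) (s, c, D) v).1,
         (altStep transf (buildPartners antipairs) (s, c, D) v).2.1,
         (altStep transf (buildPartners antipairs) (s, c, D) v).2.2) := rfl
    rw [hsplit, ih _ _ _ h2 h3, h1]

-- ===== VERDICT (by name: the statement is the Claim_ definition above) =====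
theorem solve_spec : Claim_equal_solve := by
  intro transf antipairs outbreaks _
  unfold Spec_solve solve solve_alt
  exact (fold_eq transf antipairs outbreaks [] PySem.Dict.empty PySem.Set.empty rel_empty
    (by intro p _ _ _; simp at *)).symm
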